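-- pv_equiv track=rewrite | github.com/vejuhust/Server-Status-over-HTTP-HEAD | reducer.py | merge_sorted_and_unique_lists
-- ===== SOURCE A (Python) =====
-- from heapq import merge
--
-- def merge_sorted_and_unique_lists(list1, list2):
--     list_merged = list(merge(list1, list2))
--     items_existed = set()
--     list_result = []
--     for item in list_merged:
--         if item not in items_existed:
--             list_result.append(item)
--             items_existed.add(item)
--     return list_result
-- ===== SOURCE B (Python) =====
-- def merge_sorted_and_unique_lists(list1, list2):
--     # Single fused two-pointer merge with on-the-fly dedup (list1 wins ties).
--     i, j, n1, n2 = 0, 0, len(list1), len(list2)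
--     seen = set()
--     result = []
--     while i < n1 and j < n2:
--         if list2[j] < list1[i]:
--             item = list2[j]
--             j += 1
--         else:
--             item = list1[i]
--             i += 1
--         if item not in seen:
--             seen.add(item)
--             result.append(item)
--     for item in (list1[i:] if i < n1 else list2[j:]):
--         if item not in seen:
--             seen.add(item)
--             result.append(item)
--     return result
-- ===== Notes on version B (the rewrite author's own statement) =====
-- stated objective: alternative
-- what changed: Replaced heapq.merge-into-a-list followed by a separate dedup pass with one fused two-pointer merge that dedups on the fly, never materialising the merged list.
import Mathlib
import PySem

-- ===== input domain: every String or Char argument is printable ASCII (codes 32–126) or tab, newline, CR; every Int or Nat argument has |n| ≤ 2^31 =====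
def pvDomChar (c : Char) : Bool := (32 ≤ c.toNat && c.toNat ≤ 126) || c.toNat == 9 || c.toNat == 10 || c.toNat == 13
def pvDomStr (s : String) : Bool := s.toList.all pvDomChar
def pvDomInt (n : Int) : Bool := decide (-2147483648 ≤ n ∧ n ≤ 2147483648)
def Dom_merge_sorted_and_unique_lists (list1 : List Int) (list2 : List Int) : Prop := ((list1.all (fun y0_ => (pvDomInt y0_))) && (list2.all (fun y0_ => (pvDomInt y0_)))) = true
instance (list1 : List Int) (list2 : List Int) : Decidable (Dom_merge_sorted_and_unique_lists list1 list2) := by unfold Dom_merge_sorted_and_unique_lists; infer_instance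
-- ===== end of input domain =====

-- B fuses heapq.merge + the separate dedup pass into one two-pointer merge that dedups on the fly (objective: alternative single-pass decomposition, no intermediate merged list).

-- ===== PORT A =====
-- heapq.merge on two iterators: yields list2's head only when it is strictly smaller (list1 wins ties)
def pyHeapMerge : List Int → List Int → List Int
  | [], ys => ys
  | x :: xs, [] => x :: xs
  | x :: xs, y :: ys =>
    if y < x then y :: pyHeapMerge (x :: xs) ys
    else x :: pyHeapMerge xs (y :: ys)
termination_by xs ys => xs.length + ys.length

-- the dedup loop body: `if item not in items_existed: append; add`
def dedupStep (p : PySem.Set Int × List Int) (item : Int) : PySem.Set Int × List Int :=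
  if PySem.Set.contains p.1 item then p else (PySem.Set.add p.1 item, p.2 ++ [item])

def merge_sorted_and_unique_lists (list1 : List Int) (list2 : List Int) : List Int :=
  let list_merged := pyHeapMerge list1 list2
  (list_merged.foldl dedupStep (PySem.Set.empty, [])).2

-- ===== PORT B =====
-- main while-loop: two pointers (modelled as the remaining suffixes), seen set and result threaded; returns state and both leftovers
def bLoop : List Int → List Int → PySem.Set Int → List Int → PySem.Set Int × List Int × List Int × List Int
  | x :: xs, y :: ys, seen, res =>
    if y < x then
      let p := dedupStep (seen, res) y
      bLoop (x :: xs) ys p.1 p.2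
    else
      let p := dedupStep (seen, res) x
      bLoop xs (y :: ys) p.1 p.2
  | xs, [], seen, res => (seen, res, xs, [])
  | [], ys, seen, res => (seen, res, [], ys)
termination_by xs ys => xs.length + ys.length

def merge_sorted_and_unique_lists_alt (list1 : List Int) (list2 : List Int) : List Int :=
  match bLoop list1 list2 PySem.Set.empty [] with
  | (seen, res, a, b) =>
    -- tail for-loop: list1[i:] if i < n1 else list2[j:]
    ((if a.isEmpty then b else a).foldl dedupStep (seen, res)).2

-- ===== PRECONDITION & SPEC =====
def Spec_merge_sorted_and_unique_lists (list1 : List Int) (list2 : List Int) (out : List Int) : Prop := out = merge_sorted_and_unique_lists_alt list1 list2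
instance (list1 : List Int) (list2 : List Int) (out : List Int) : Decidable (Spec_merge_sorted_and_unique_lists list1 list2 out) := by unfold Spec_merge_sorted_and_unique_lists; infer_instance

-- ===== CLAIM (what is proved, stated in full; the proofs are below) =====
def Claim_equal_merge_sorted_and_unique_lists : Prop := ∀ (list1 : List Int) (list2 : List Int), Dom_merge_sorted_and_unique_lists list1 list2 → Spec_merge_sorted_and_unique_lists list1 list2 (merge_sorted_and_unique_lists list1 list2)

-- ===== LEMMAS AND PROOFS =====

-- B's fused loop + drain computes exactly A's dedup fold over A's merged list
theorem bLoop_eq_fold : ∀ (xs ys : List Int) (seen : PySem.Set Int) (res : List Int),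
    (match bLoop xs ys seen res with
     | (s, r, a, b) => ((if a.isEmpty then b else a).foldl dedupStep (s, r)).2)
    = ((pyHeapMerge xs ys).foldl dedupStep (seen, res)).2 := by
  intro xs ys
  induction xs, ys using pyHeapMerge.induct with
  | case1 ys => intro seen res; cases ys <;> simp [bLoop, pyHeapMerge]
  | case2 x xs => intro seen res; simp [bLoop, pyHeapMerge]
  | case3 x xs y ys hlt ih =>
    intro seen res
    simp only [bLoop, pyHeapMerge, hlt, if_pos, List.foldl_cons]
    exact ih _ _
  | case4 x xs y ys hlt ih =>
    intro seen res
    simp only [bLoop, pyHeapMerge, hlt, List.foldl_cons]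
    exact ih _ _

-- ===== VERDICT (by name: the statement is the Claim_ definition above) =====
theorem merge_sorted_and_unique_lists_spec : Claim_equal_merge_sorted_and_unique_lists := by
  intro l1 l2 _
  unfold Spec_merge_sorted_and_unique_lists merge_sorted_and_unique_lists merge_sorted_and_unique_lists_alt
  exact (bLoop_eq_fold l1 l2 PySem.Set.empty []).symm
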